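-- pv_equiv track=rewrite | github.com/enzonjagi/python_projects | Python_proj_book/bagels.py | getClues
-- ===== SOURCE A (Python) =====
-- def getClues(guess, secretNum):
--     """
--     Returns a string with Pico, fermi, or bagels
--     clues for a guess and secret number pair.
--
--     """
--
--     if guess == secretNum:
--         return "You got it."
--
--     clues = []
--
--     for i in range(len(guess)):
--         if guess[i] == secretNum[i]:
--             # A correct digit in correct position.
--             clues.append("Fermi")
--         elif guess[i] in secretNum:
--             # A correct guess in wrong position.
--             clues.append("Pico")
--
--     if len(clues) == 0:
--         return "Bagels."
--     else:
--         # Sort the clues into alphabetical order so their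
--         # original order doesn't give information away.
--         clues.sort()
--         # Make a single string from the list of string clues
--         return " ".join(clues)
-- ===== SOURCE B (Python) =====
-- def getClues(guess, secretNum):
--     """Single pass that builds the answer string directly: exact matches
--     prepend 'Fermi ' and misplaced matches append 'Pico ', so every Fermi
--     ends up before every Pico without any clue list, counter or sort."""
--     if guess == secretNum:
--         return "You got it."
--     out = ""
--     for i, g in enumerate(guess):
--         if g == secretNum[i]:
--             out = "Fermi " + out
--         elif g in secretNum:
--             out = out + "Pico "
--     return out[:-1] if out else "Bagels."
-- ===== Notes on version B (the rewrite author's own statement) =====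
-- stated objective: simpler
-- what changed: B replaces A's collect-labels-into-a-list-then-sort-then-join construction with a single pass that builds the answer string directly, prepending 'Fermi ' for exact matches and appending 'Pico ' for misplaced ones (so Fermis precede Picos by construction) and finally stripping the trailing space; no clue list, no sort, no join.
import Mathlib
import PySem

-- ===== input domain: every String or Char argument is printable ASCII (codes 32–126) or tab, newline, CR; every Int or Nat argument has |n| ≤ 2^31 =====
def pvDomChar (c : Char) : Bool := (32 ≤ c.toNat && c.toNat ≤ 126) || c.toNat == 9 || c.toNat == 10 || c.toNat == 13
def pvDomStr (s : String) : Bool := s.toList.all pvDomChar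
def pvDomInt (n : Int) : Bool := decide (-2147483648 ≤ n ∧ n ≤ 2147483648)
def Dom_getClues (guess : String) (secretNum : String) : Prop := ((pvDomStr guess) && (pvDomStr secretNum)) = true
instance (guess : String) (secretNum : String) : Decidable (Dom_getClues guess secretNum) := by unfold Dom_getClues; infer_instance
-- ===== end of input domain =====

-- B builds the answer string directly in one pass (prepend "Fermi ", append "Pico ", strip the trailing space) instead of A's clue list + sort + join (objective: simpler).

-- ===== PORT A =====
-- A's loop 'for i in range(len(guess)): … clues.append(…)' as a foldl over the index range
def getCluesLoop (g s : List Char) : List String :=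
  (PySem.List.pyRange 0 g.length 1).foldl (fun clues i =>
    match PySem.List.pyGet? g i, PySem.List.pyGet? s i with
    | some gc, some sc =>
        if gc == sc then clues ++ ["Fermi"]
        else if gc ∈ s then clues ++ ["Pico"]
        else clues
    | _, _ => clues) []

def getClues (guess : String) (secretNum : String) : String :=
  if guess == secretNum then "You got it."
  else
    let clues := getCluesLoop guess.toList secretNum.toList
    if clues.length == 0 then "Bagels."
    else PySem.Str.join " " (PySem.List.sorted clues (fun x => x) false)

-- ===== PORT B =====
-- B's loop 'for i, g in enumerate(guess): …' building the output characters directly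
-- (the 'none' arm of pyGet? is where Python raises IndexError; it is excluded by Pre_)
def getCluesAltLoop (g s : List Char) : List Char :=
  (PySem.List.enumerate g 0).foldl (fun out p =>
    match PySem.List.pyGet? s p.1 with
    | some sc =>
        if p.2 == sc then "Fermi ".toList ++ out
        else if p.2 ∈ s then out ++ "Pico ".toList
        else out
    | none => out) []

def getClues_alt (guess : String) (secretNum : String) : String :=
  if guess == secretNum then "You got it."
  else
    let out := getCluesAltLoop guess.toList secretNum.toList
    if out.isEmpty then "Bagels."
    else String.ofList (PySem.List.slice out none (some (-1)))

-- ===== PRECONDITION & SPEC =====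
-- Pre_ excludes exactly the inputs on which A raises IndexError (guess strictly longer than secretNum); B raises there too.
def Pre_getClues (guess : String) (secretNum : String) : Prop :=
  guess.toList.length ≤ secretNum.toList.length
instance (guess : String) (secretNum : String) : Decidable (Pre_getClues guess secretNum) := by unfold Pre_getClues; infer_instance
def pvWitness_getClues : String × String := ("123", "132")

def Spec_getClues (guess : String) (secretNum : String) (out : String) : Prop := out = getClues_alt guess secretNum
instance (guess : String) (secretNum : String) (out : String) : Decidable (Spec_getClues guess secretNum out) := by unfold Spec_getClues; infer_instance

-- ===== CLAIM (what is proved, stated in full; the proofs are below) =====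
def Claim_equal_getClues : Prop := ∀ (guess : String) (secretNum : String), Dom_getClues guess secretNum → Pre_getClues guess secretNum → Spec_getClues guess secretNum (getClues guess secretNum)

-- ===== LEMMAS AND PROOFS =====

-- A's per-position clue as a (guess char, secret char) pair function
def clueOf (s : List Char) (p : Char × Char) : List String :=
  if p.1 == p.2 then ["Fermi"] else if p.1 ∈ s then ["Pico"] else []

lemma flatMap_range_zip {α β γ : Type} (g : List α) (s : List β) (f : α × β → List γ)
    (h : g.length ≤ s.length) :
    (List.range g.length).flatMap (fun i =>
      match g[i]?, s[i]? with
      | some a, some b => f (a, b)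
      | _, _ => []) = (g.zip s).flatMap f := by
  induction g generalizing s with
  | nil => simp
  | cons gc gt ih =>
    cases s with
    | nil => simp at h
    | cons sc st =>
      rw [List.length_cons, List.range_succ_eq_map, List.flatMap_cons, List.flatMap_map]
      simp only [List.getElem?_cons_zero, List.getElem?_cons_succ, Nat.succ_eq_add_one]
      rw [List.zip_cons_cons, List.flatMap_cons]
      congr 1
      exact ih st (Nat.le_of_succ_le_succ h)

lemma getCluesLoop_eq_flatMap (g s : List Char) (h : g.length ≤ s.length) :
    getCluesLoop g s = (g.zip s).flatMap (clueOf s) := by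
  unfold getCluesLoop
  have hbody : (fun (clues : List String) (i : Int) =>
      match PySem.List.pyGet? g i, PySem.List.pyGet? s i with
      | some gc, some sc =>
          if gc == sc then clues ++ ["Fermi"]
          else if gc ∈ s then clues ++ ["Pico"]
          else clues
      | _, _ => clues)
      = (fun clues i => clues ++
          (match PySem.List.pyGet? g i, PySem.List.pyGet? s i with
           | some gc, some sc => clueOf s (gc, sc)
           | _, _ => [])) := by
    funext clues i
    cases PySem.List.pyGet? g i with
    | none => simp
    | some gc =>
      cases PySem.List.pyGet? s i with
      | none => simp
      | some sc => simp only [clueOf]; split_ifs <;> simp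
  rw [hbody, PySem.List.foldl_append_eq_flatMap, List.nil_append,
      PySem.List.pyRange_zero_natCast, List.flatMap_map]
  simp only [PySem.List.pyGet?_natCast]
  refine Eq.trans ?_ (flatMap_range_zip g s (clueOf s) h)
  congr 1
  funext i
  cases g[i]? <;> cases s[i]? <;> rfl

lemma clues_perm (S : List Char) (l : List (Char × Char)) :
    (l.flatMap (clueOf S)).Perm
      (List.replicate (l.countP (fun p => p.1 == p.2)) "Fermi" ++
       List.replicate (l.countP (fun p => p.1 != p.2 && decide (p.1 ∈ S))) "Pico") := by
  induction l with
  | nil => simp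
  | cons p t ih =>
    by_cases h1 : p.1 = p.2
    · simpa [clueOf, h1, List.countP_cons, List.replicate_succ] using ih.cons "Fermi"
    · by_cases h2 : p.1 ∈ S
      · have hb : (p.1 != p.2 && decide (p.1 ∈ S)) = true := by simp [h1, h2]
        have hc : clueOf S p = ["Pico"] := by simp [clueOf, h1, h2]
        rw [List.flatMap_cons, hc, List.countP_cons, List.countP_cons, hb]
        simp only [beq_iff_eq, h1, if_false, if_true, Nat.add_zero, List.replicate_succ,
          List.singleton_append]
        exact (ih.cons "Pico").trans List.perm_middle.symm
      · simpa [clueOf, h1, h2, List.countP_cons] using ih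

lemma sorted_clues (a b : Nat) (xs : List String)
    (hperm : xs.Perm (List.replicate a "Fermi" ++ List.replicate b "Pico")) :
    PySem.List.sorted xs (fun x => x) false = List.replicate a "Fermi" ++ List.replicate b "Pico" := by
  apply PySem.List.sorted_id_eq_of_perm_of_pairwise _ _ hperm.symm
  apply List.pairwise_append.2
  refine ⟨List.pairwise_replicate.2 (Or.inr le_rfl), List.pairwise_replicate.2 (Or.inr le_rfl), ?_⟩
  intro x hx y hy
  rw [List.eq_of_mem_replicate hx, List.eq_of_mem_replicate hy]
  exact le_of_lt (by rw [String.lt_iff_toList_lt]; decide)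

-- B's loop body over a (guess char, secret char) pair
def altStep (S : List Char) (out : List Char) (p : Char × Char) : List Char :=
  if p.1 == p.2 then "Fermi ".toList ++ out
  else if p.1 ∈ S then out ++ "Pico ".toList
  else out

-- x ++ flatten (replicate n x) = flatten (replicate n x) ++ x
lemma flatten_replicate_comm {α : Type} (n : Nat) (x : List α) :
    x ++ (List.replicate n x).flatten = (List.replicate n x).flatten ++ x := by
  induction n with
  | zero => simp
  | succ m ih =>
    calc x ++ (List.replicate (m + 1) x).flatten
        = x ++ (x ++ (List.replicate m x).flatten) := by rw [List.replicate_succ, List.flatten_cons]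
      _ = x ++ ((List.replicate m x).flatten ++ x) := by rw [ih]
      _ = (x ++ (List.replicate m x).flatten) ++ x := by rw [List.append_assoc]
      _ = (List.replicate (m + 1) x).flatten ++ x := by rw [List.replicate_succ, List.flatten_cons]

-- B's fold over zipped pairs is the Fermi block, the start accumulator, the Pico block
lemma foldl_altStep (S : List Char) (l : List (Char × Char)) (acc : List Char) :
    l.foldl (altStep S) acc =
      (List.replicate (l.countP (fun p => p.1 == p.2)) "Fermi ".toList).flatten ++ acc ++
      (List.replicate (l.countP (fun p => p.1 != p.2 && decide (p.1 ∈ S))) "Pico ".toList).flatten := by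
  induction l generalizing acc with
  | nil => simp
  | cons p t ih =>
    rw [List.foldl_cons, List.countP_cons, List.countP_cons]
    by_cases h1 : p.1 = p.2
    · have e1 : altStep S acc p = "Fermi ".toList ++ acc := by simp [altStep, h1]
      have c1 : (if (p.1 == p.2) = true then 1 else 0) = 1 := by simp [h1]
      have c2 : (if (p.1 != p.2 && decide (p.1 ∈ S)) = true then 1 else 0) = 0 := by simp [h1]
      rw [e1, ih, c1, c2, Nat.add_zero, List.replicate_succ, List.flatten_cons]
      simp only [← List.append_assoc]
      rw [← flatten_replicate_comm, Nat.add_zero]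
    · by_cases h2 : p.1 ∈ S
      · have e2 : altStep S acc p = acc ++ "Pico ".toList := by simp [altStep, h1, h2]
        have c1 : (if (p.1 == p.2) = true then 1 else 0) = 0 := by simp [h1]
        have c2 : (if (p.1 != p.2 && decide (p.1 ∈ S)) = true then 1 else 0) = 1 := by simp [h1, h2]
        rw [e2, ih, c1, c2, Nat.add_zero, List.replicate_succ, List.flatten_cons]
        simp only [← List.append_assoc]
      · have e3 : altStep S acc p = acc := by simp [altStep, h1, h2]
        have c1 : (if (p.1 == p.2) = true then 1 else 0) = 0 := by simp [h1]
        have c2 : (if (p.1 != p.2 && decide (p.1 ∈ S)) = true then 1 else 0) = 0 := by simp [h2]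
        rw [e3, ih, c1, c2, Nat.add_zero, Nat.add_zero]

-- B's enumerate/index loop equals the fold over zipped pairs
lemma getCluesAltLoop_aux (g s : List Char) (k : Nat) (acc : List Char)
    (h : k + g.length ≤ s.length) :
    (PySem.List.enumerate g (k : Int)).foldl (fun out p =>
      match PySem.List.pyGet? s p.1 with
      | some sc =>
          if p.2 == sc then "Fermi ".toList ++ out
          else if p.2 ∈ s then out ++ "Pico ".toList
          else out
      | none => out) acc = (g.zip (s.drop k)).foldl (altStep s) acc := by
  induction g generalizing k acc with
  | nil => simp [PySem.List.enumerate]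
  | cons gc gt ih =>
    have hk : k < s.length := by simp at h; omega
    rw [PySem.List.enumerate_cons, List.foldl_cons,
        List.drop_eq_getElem_cons hk, List.zip_cons_cons, List.foldl_cons]
    simp only [PySem.List.pyGet?_natCast, List.getElem?_eq_getElem hk]
    have hcast : (k : Int) + 1 = ((k + 1 : Nat) : Int) := by push_cast; ring
    rw [hcast, ih _ _ (by simp at h ⊢; omega)]
    rfl

-- flatten of blocks with a trailing space = ' '-join of the bare blocks plus a trailing space
lemma flatten_space_blocks (parts : List (List Char)) (h : parts ≠ []) :
    (parts.map (· ++ [' '])).flatten = PySem.Chars.join [' '] parts ++ [' '] := by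
  induction parts with
  | nil => exact absurd rfl h
  | cons x t ih =>
    cases t with
    | nil => simp [PySem.Chars.join_singleton]
    | cons y u =>
      rw [List.map_cons, List.flatten_cons, ih (by simp), PySem.Chars.join_cons_cons]
      simp [List.append_assoc]

-- ===== VERDICT (by name: the statement is the Claim_ definition above) =====
theorem getClues_spec : Claim_equal_getClues := by
  intro guess secretNum _ hpre
  unfold Pre_getClues at hpre
  unfold Spec_getClues getClues getClues_alt
  by_cases heq : guess = secretNum
  · simp [heq]
  · simp only [beq_iff_eq, heq, if_false]
    set S := secretNum.toList with hS
    set l := guess.toList.zip S with hl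
    set a := l.countP (fun p => p.1 == p.2) with ha
    set b := l.countP (fun p => p.1 != p.2 && decide (p.1 ∈ S)) with hb
    have hL : getCluesLoop guess.toList S = l.flatMap (clueOf S) :=
      getCluesLoop_eq_flatMap _ _ hpre
    have hperm := clues_perm S l
    have hlen : (l.flatMap (clueOf S)).length = a + b := by
      rw [hperm.length_eq]; simp [← ha, ← hb]
    have hB : getCluesAltLoop guess.toList S =
        (List.replicate a "Fermi ".toList).flatten ++ (List.replicate b "Pico ".toList).flatten := by
      unfold getCluesAltLoop
      have h0 : (0 : Int) = ((0 : Nat) : Int) := rfl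
      rw [h0, getCluesAltLoop_aux guess.toList S 0 [] (by omega)]
      rw [List.drop_zero, foldl_altStep, List.append_nil]
    rw [hL, hlen, sorted_clues a b _ hperm, hB]
    by_cases hz : a = 0 ∧ b = 0
    · simp [hz.1, hz.2]
    · have h1 : ¬ (a + b = 0) := fun h => hz ⟨by omega, by omega⟩
      have hparts : (List.replicate a ("Fermi".toList) ++ List.replicate b ("Pico".toList)) ≠ [] := by
        intro h; rw [List.append_eq_nil_iff] at h; simp at h; exact hz ⟨h.1, h.2⟩
      have hfl : (List.replicate a "Fermi ".toList).flatten ++ (List.replicate b "Pico ".toList).flatten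
          = PySem.Chars.join [' '] (List.replicate a ("Fermi".toList) ++ List.replicate b ("Pico".toList)) ++ [' '] := by
        rw [← flatten_space_blocks _ hparts, List.map_append, List.map_replicate, List.map_replicate,
            List.flatten_append]
        rfl
      have hne : ((List.replicate a "Fermi ".toList).flatten ++ (List.replicate b "Pico ".toList).flatten).isEmpty = false := by
        rw [hfl]; simp
      rw [if_neg h1, hne, if_neg (by simp)]
      rw [hfl, PySem.List.slice_to_neg_one, List.dropLast_concat]
      have hj : (PySem.Str.join " " (List.replicate a "Fermi" ++ List.replicate b "Pico")).toList
          = PySem.Chars.join [' '] (List.replicate a ("Fermi".toList) ++ List.replicate b ("Pico".toList)) := by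
        rw [PySem.Str.toList_join, List.map_append, List.map_replicate, List.map_replicate]
        rfl
      rw [← hj, String.ofList_toList]
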